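-- pv_equiv track=rewrite | github.com/mimo-owl/STEP2025_challenges | week1/ch2/find_max_score_anagrams2.py | cal_score
-- ===== SOURCE A (Python) =====
-- def cal_score(word):
--     score = 0
--     scores_1 = {'a', 'e', 'h', 'i', 'n', 'o', 'r', 's', 't'}
--     scores_2 = {'c', 'd', 'l', 'm', 'u'}
--     scores_3 = {'b', 'f', 'g', 'p', 'v', 'w', 'y'}
--     scores_4 = {'j', 'k', 'q', 'x', 'z'}
--     for char in word:
--         if char in scores_1:
--             score += 1
--         elif char in scores_2:
--             score += 2
--         elif char in scores_3:
--             score += 3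
--         elif char in scores_4:
--             score += 4
--     return score
-- ===== SOURCE B (Python) =====
-- def cal_score(word):
--     counts = {}
--     for ch in word:
--         counts[ch] = counts.get(ch, 0) + 1
--     total = 0
--     for weight, group in ((1, 'aehinorst'), (2, 'cdlmu'), (3, 'bfgpvwy'), (4, 'jkqxz')):
--         total += weight * sum(counts.get(ch, 0) for ch in group)
--     return total
-- ===== Notes on version B (the rewrite author's own statement) =====
-- stated objective: alternative
-- what changed: B builds a character-frequency dictionary of the word in one pass and then aggregates by score tier, looping over the four fixed letter groups and adding weight * (sum of counts of the group's letters), instead of branching through an if/elif chain per character.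
import Mathlib
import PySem

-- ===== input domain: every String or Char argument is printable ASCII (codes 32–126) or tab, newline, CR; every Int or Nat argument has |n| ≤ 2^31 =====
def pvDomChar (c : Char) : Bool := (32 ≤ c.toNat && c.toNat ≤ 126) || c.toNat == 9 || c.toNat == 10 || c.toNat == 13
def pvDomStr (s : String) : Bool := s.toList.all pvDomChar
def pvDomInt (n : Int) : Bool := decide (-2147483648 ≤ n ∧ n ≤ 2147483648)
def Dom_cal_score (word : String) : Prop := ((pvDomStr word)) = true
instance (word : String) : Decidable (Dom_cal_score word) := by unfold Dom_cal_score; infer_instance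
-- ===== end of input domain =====

-- B replaces A's per-character if/elif chain by a frequency dictionary built once,
-- then aggregates weight * (sum of the counts of each fixed letter group) per score tier.


-- ===== PORT A =====
def cal_score (word : String) : Int :=
  let score : Int := 0
  let scores_1 : PySem.Set Char := PySem.Set.ofList ['a', 'e', 'h', 'i', 'n', 'o', 'r', 's', 't']
  let scores_2 : PySem.Set Char := PySem.Set.ofList ['c', 'd', 'l', 'm', 'u']
  let scores_3 : PySem.Set Char := PySem.Set.ofList ['b', 'f', 'g', 'p', 'v', 'w', 'y']
  let scores_4 : PySem.Set Char := PySem.Set.ofList ['j', 'k', 'q', 'x', 'z']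
  word.toList.foldl (fun score char =>
    if scores_1.contains char then score + 1
    else if scores_2.contains char then score + 2
    else if scores_3.contains char then score + 3
    else if scores_4.contains char then score + 4
    else score) score

-- ===== PORT B =====
def cal_score_alt (word : String) : Int :=
  let counts : PySem.Dict Char Int :=
    word.toList.foldl (fun d ch => d.insert ch (d.getD ch 0 + 1)) PySem.Dict.empty
  let groups : List (Int × String) := [(1, "aehinorst"), (2, "cdlmu"), (3, "bfgpvwy"), (4, "jkqxz")]
  groups.foldl (fun total wg =>
    total + wg.1 * (wg.2.toList.map (fun ch => counts.getD ch 0)).sum) 0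

-- ===== PRECONDITION & SPEC =====
def Spec_cal_score (word : String) (out : Int) : Prop := out = cal_score_alt word
instance (word : String) (out : Int) : Decidable (Spec_cal_score word out) := by unfold Spec_cal_score; infer_instance

-- ===== CLAIM (what is proved, stated in full; the proofs are below) =====
def Claim_equal_cal_score : Prop := ∀ (word : String), Dom_cal_score word → Spec_cal_score word (cal_score word)

-- ===== LEMMAS AND PROOFS =====

-- per-group sum of counts of the letters of g in l
def gsum (l : List Char) (g : List Char) : Int :=
  (g.map (fun ch => (l.count ch : Int))).sum

def tally (l : List Char) : Int :=
  1 * gsum l ['a','e','h','i','n','o','r','s','t'] + 2 * gsum l ['c','d','l','m','u']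
    + 3 * gsum l ['b','f','g','p','v','w','y'] + 4 * gsum l ['j','k','q','x','z']

lemma sum_indicator (c : Char) (g : List Char) :
    (g.map (fun ch => (if ch == c then (1 : Int) else 0))).sum = g.count c := by
  induction g with
  | nil => simp
  | cons a g ih =>
    rw [List.map_cons, List.sum_cons, ih, List.count_cons]
    push_cast
    rcases eq_or_ne a c with rfl | h
    · simp; ring
    · simp [h]

lemma count_cons_int (c ch : Char) (l : List Char) :
    ((c :: l).count ch : Int) = (l.count ch : Int) + (if ch == c then (1 : Int) else 0) := by
  rw [List.count_cons]
  push_cast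
  rcases eq_or_ne ch c with rfl | h
  · simp
  · simp [h, Ne.symm h]

lemma gsum_cons (c : Char) (l g : List Char) :
    gsum (c :: l) g = gsum l g + g.count c := by
  unfold gsum
  rw [← sum_indicator c g, ← List.sum_map_add]
  apply congrArg
  apply List.map_congr_left
  intro ch _
  exact count_cons_int c ch l

lemma gsum_single (c : Char) (g : List Char) : gsum [c] g = g.count c := by
  unfold gsum
  rw [← sum_indicator c g]
  apply congrArg
  apply List.map_congr_left
  intro ch _
  have := count_cons_int c ch []
  simpa using this

lemma pt_eq (c : Char) :
    tally [c] =
      (if (['a','e','h','i','n','o','r','s','t'] : List Char).contains c then (1 : Int)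
       else if (['c','d','l','m','u'] : List Char).contains c then 2
       else if (['b','f','g','p','v','w','y'] : List Char).contains c then 3
       else if (['j','k','q','x','z'] : List Char).contains c then 4
       else 0) := by
  by_cases h1 : c ∈ (['a','e','h','i','n','o','r','s','t'] : List Char)
  · fin_cases h1 <;> decide
  by_cases h2 : c ∈ (['c','d','l','m','u'] : List Char)
  · fin_cases h2 <;> decide
  by_cases h3 : c ∈ (['b','f','g','p','v','w','y'] : List Char)
  · fin_cases h3 <;> decide
  by_cases h4 : c ∈ (['j','k','q','x','z'] : List Char)
  · fin_cases h4 <;> decide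
  · have e1 : (['a','e','h','i','n','o','r','s','t'] : List Char).contains c = false := by
      simpa using h1
    have e2 : (['c','d','l','m','u'] : List Char).contains c = false := by simpa using h2
    have e3 : (['b','f','g','p','v','w','y'] : List Char).contains c = false := by simpa using h3
    have e4 : (['j','k','q','x','z'] : List Char).contains c = false := by simpa using h4
    rw [e1, e2, e3, e4]
    unfold tally
    rw [gsum_single, gsum_single, gsum_single, gsum_single]
    have zc : ∀ g : List Char, c ∉ g → ((g.count c : Int) = 0) := by
      intro g hg
      simp [List.count_eq_zero_of_not_mem hg]
    rw [zc _ h1, zc _ h2, zc _ h3, zc _ h4]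
    simp

lemma tally_cons (c : Char) (l : List Char) : tally (c :: l) = tally l + tally [c] := by
  unfold tally
  rw [gsum_cons, gsum_cons, gsum_cons, gsum_cons,
      gsum_single, gsum_single, gsum_single, gsum_single]
  ring

lemma foldA_eq (l : List Char) (s : Int) :
    l.foldl (fun score char =>
      if (['a','e','h','i','n','o','r','s','t'] : List Char).contains char then score + 1
      else if (['c','d','l','m','u'] : List Char).contains char then score + 2
      else if (['b','f','g','p','v','w','y'] : List Char).contains char then score + 3
      else if (['j','k','q','x','z'] : List Char).contains char then score + 4
      else score) s = s + tally l := by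
  induction l generalizing s with
  | nil => simp [tally, gsum]
  | cons c l ih =>
    rw [List.foldl_cons, ih, tally_cons, pt_eq]
    split_ifs <;> try ring

lemma alt_eq (word : String) : cal_score_alt word = tally word.toList := by
  unfold cal_score_alt tally gsum
  simp [PySem.Dict.getD_foldl_insert_add_one, PySem.Dict.getD_empty, List.foldl]

-- ===== VERDICT (by name: the statement is the Claim_ definition above) =====
theorem cal_score_spec : Claim_equal_cal_score := by
  intro word _
  unfold Spec_cal_score
  rw [alt_eq]
  have hA : cal_score word =
      word.toList.foldl (fun score char =>
        if (['a','e','h','i','n','o','r','s','t'] : List Char).contains char then score + 1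
        else if (['c','d','l','m','u'] : List Char).contains char then score + 2
        else if (['b','f','g','p','v','w','y'] : List Char).contains char then score + 3
        else if (['j','k','q','x','z'] : List Char).contains char then score + 4
        else score) 0 := rfl
  rw [hA, foldA_eq, zero_add]
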